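-- pv_equiv track=rewrite | github.com/LautaroAguila/IntroduccionProgramacion | python/parcial2.py | acomodar
-- ===== SOURCE A (Python) =====
-- from queue import LifoQueue as  Pila
--
-- def acomodar(s: list[str]) -> list[str]:
--     up = Pila()
--     lla = Pila()
--     ordenada: list[str] = []
--     for i in s:
--         if i == "LLA":
--             lla.put(i)
--         else:
--             up.put(i)
--     while up.empty() == False:
--         ordenada += [up.get()]
--     while lla.empty() == False:
--         ordenada += [lla.get()]
--     return ordenada
-- ===== SOURCE B (Python) =====
-- def acomodar(s: list[str]) -> list[str]:
--     return [x for x in reversed(s) if x != "LLA"] + ["LLA"] * s.count("LLA")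
-- ===== Notes on version B (the rewrite author's own statement) =====
-- stated objective: simpler
-- what changed: Replaces the two-stack (queue.LifoQueue) partition-and-drain with a direct construction: a reversed filtering comprehension for the non-LLA part plus a counted replication of "LLA"; no stacks are maintained.
import Mathlib
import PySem

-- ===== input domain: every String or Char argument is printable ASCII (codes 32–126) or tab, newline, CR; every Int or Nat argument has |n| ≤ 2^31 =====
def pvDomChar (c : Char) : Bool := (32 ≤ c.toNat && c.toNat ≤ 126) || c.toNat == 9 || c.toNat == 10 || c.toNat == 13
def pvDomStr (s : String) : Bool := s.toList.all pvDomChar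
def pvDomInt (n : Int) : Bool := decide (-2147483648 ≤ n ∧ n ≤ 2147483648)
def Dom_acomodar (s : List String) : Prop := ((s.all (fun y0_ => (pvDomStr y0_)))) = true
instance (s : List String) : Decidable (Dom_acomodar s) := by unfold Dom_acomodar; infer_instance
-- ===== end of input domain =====

-- B builds the result directly (reversed filter + counted replication) instead of A's two-stack partition-and-drain; objective: simpler.

-- ===== PORT A =====
-- the partition loop: push each item onto the LLA stack or the other stack (push = cons, top = head)
def acomodarLoop (s up lla : List String) : List String × List String :=
  match s with
  | [] => (up, lla)
  | i :: rest =>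
    if i == "LLA" then acomodarLoop rest up (i :: lla)
    else acomodarLoop rest (i :: up) lla

-- 'while not st.empty(): ordenada += [st.get()]' — pop from the top, append to the accumulator
def acomodarDrain (st acc : List String) : List String :=
  match st with
  | [] => acc
  | x :: xs => acomodarDrain xs (acc ++ [x])

def acomodar (s : List String) : List String :=
  let p := acomodarLoop s [] []
  acomodarDrain p.2 (acomodarDrain p.1 [])

-- ===== PORT B =====
def acomodar_alt (s : List String) : List String :=
  (s.reverse.filter (fun x => x != "LLA")) ++ List.replicate (s.count "LLA") "LLA"

-- ===== PRECONDITION & SPEC =====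
def Spec_acomodar (s : List String) (out : List String) : Prop := out = acomodar_alt s
instance (s : List String) (out : List String) : Decidable (Spec_acomodar s out) := by unfold Spec_acomodar; infer_instance

-- ===== CLAIM (what is proved, stated in full; the proofs are below) =====
def Claim_equal_acomodar : Prop := ∀ (s : List String), Dom_acomodar s → Spec_acomodar s (acomodar s)

-- ===== LEMMAS AND PROOFS =====

theorem acomodarDrain_eq (st acc : List String) : acomodarDrain st acc = acc ++ st := by
  induction st generalizing acc with
  | nil => simp [acomodarDrain]
  | cons x xs ih => simp [acomodarDrain, ih]

theorem acomodarLoop_eq (s up lla : List String) :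
    acomodarLoop s up lla =
      ((s.filter (fun x => x != "LLA")).reverse ++ up,
       List.replicate (s.count "LLA") "LLA" ++ lla) := by
  induction s generalizing up lla with
  | nil => simp [acomodarLoop]
  | cons i rest ih =>
    by_cases h : i = "LLA"
    · subst h
      simp only [acomodarLoop, ih, beq_self_eq_true, if_true, List.count_cons_self,
        List.replicate_succ]
      rw [← List.singleton_append (x := "LLA") (l := lla), ← List.append_assoc, ← List.replicate_succ',
        List.replicate_succ]
      simp
    · simp [acomodarLoop, h, ih]

-- ===== VERDICT (by name: the statement is the Claim_ definition above) =====
theorem acomodar_spec : Claim_equal_acomodar := by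
  intro s _
  unfold Spec_acomodar acomodar acomodar_alt
  simp [acomodarLoop_eq, acomodarDrain_eq, List.filter_reverse]
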